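-- pv_equiv track=rewrite | github.com/horimpark/code-playground | codewars/6kyu/Find character.py | find_characters
-- ===== SOURCE A (Python) =====
-- from collections import Counter, defaultdict
--
-- def find_characters(matrix):
--     matrix2 = []
--     for m in matrix.split("\n"):
--         matrix2.extend(list(m))
--
--     cnt = defaultdict(list)
--     for x, y in sorted(dict(Counter(matrix2)).items(), key=lambda x: x[1]):
--         cnt[y].append(x)
--     return "".join(sorted(cnt[min(list(cnt.keys()))], key=lambda x: (x.isdigit(), x)))
-- ===== SOURCE B (Python) =====
-- from collections import Counter
--
-- def find_characters(matrix):
--     counter = Counter(c for c in matrix if c != "\n")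
--     m = min(counter.values())
--     chars = [c for c, n in counter.items() if n == m]
--     return "".join(sorted(chars, key=lambda x: (x.isdigit(), x)))
-- ===== Notes on version B (the rewrite author's own statement) =====
-- stated objective: simpler
-- what changed: B drops A's defaultdict frequency-to-chars inverted index built from the Counter items sorted by count: it takes min over the Counter's values once and filters the characters with that count, then sorts them by (isdigit, char).
-- outside the precondition, e.g. on find_characters('\n'): A raises ValueError, B raises ValueError
import Mathlib
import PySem

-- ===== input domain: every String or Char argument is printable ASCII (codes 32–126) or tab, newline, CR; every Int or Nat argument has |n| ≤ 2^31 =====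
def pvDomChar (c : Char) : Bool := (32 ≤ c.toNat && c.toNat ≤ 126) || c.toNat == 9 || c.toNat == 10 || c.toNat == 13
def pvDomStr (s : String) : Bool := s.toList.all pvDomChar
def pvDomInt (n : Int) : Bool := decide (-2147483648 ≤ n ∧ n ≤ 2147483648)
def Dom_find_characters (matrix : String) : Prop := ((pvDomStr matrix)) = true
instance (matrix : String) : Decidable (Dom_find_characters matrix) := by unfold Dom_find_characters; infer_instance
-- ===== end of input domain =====

-- B replaces A's defaultdict frequency→chars inverted index (built from the Counter items
-- sorted by count) by a single min over the Counter's values plus a filter (objective: simpler).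

-- ===== PORT A =====
def find_characters (matrix : String) : String :=
  let matrix2 := (PySem.Chars.splitOn matrix.toList ['\n']).foldl (fun acc m => acc ++ m) []
  let cnt := (PySem.List.sorted (PySem.Dict.counter matrix2).items (fun x => x.2) false).foldl
      (fun (d : PySem.Dict Int (List Char)) xy => d.modify xy.2 [] (fun l => l ++ [xy.1]))
      PySem.Dict.empty
  match PySem.List.min? cnt.keys (fun k => k) with
  | none => ""   -- Python raises ValueError (min of an empty sequence) here; excluded by Pre_
  | some m => String.ofList (PySem.List.sorted2 (cnt.getD m []) (fun x => PySem.Chars.isdigit x) (fun x => x) false)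

-- ===== PORT B =====
def find_characters_alt (matrix : String) : String :=
  let counter := PySem.Dict.counter (matrix.toList.filter (fun c => c != '\n'))
  match PySem.List.min? counter.values (fun v => v) with
  | none => ""   -- Python raises ValueError (min of an empty sequence) here; excluded by Pre_
  | some m =>
    let chars := (counter.items.filter (fun p => p.2 == m)).map (fun p => p.1)
    String.ofList (PySem.List.sorted2 chars (fun x => PySem.Chars.isdigit x) (fun x => x) false)

-- ===== PRECONDITION & SPEC =====
-- Pre_ excludes strings with no character besides '\n' (both A and B raise ValueError there: min of an empty sequence).
def Pre_find_characters (matrix : String) : Prop :=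
  matrix.toList.any (fun c => c != '\n') = true
instance (matrix : String) : Decidable (Pre_find_characters matrix) := by unfold Pre_find_characters; infer_instance
def pvWitness_find_characters : String := "ab\n1"
def Spec_find_characters (matrix : String) (out : String) : Prop := out = find_characters_alt matrix
instance (matrix : String) (out : String) : Decidable (Spec_find_characters matrix out) := by unfold Spec_find_characters; infer_instance

-- ===== CLAIM (what is proved, stated in full; the proofs are below) =====
def Claim_equal_find_characters : Prop := ∀ (matrix : String), Dom_find_characters matrix → Pre_find_characters matrix → Spec_find_characters matrix (find_characters matrix)

-- ===== LEMMAS AND PROOFS =====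

-- splitting on '\n' and flattening yields exactly the non-'\n' characters
theorem pv_go_flatten (fuel : Nat) : ∀ (l cur : List Char) (acc : List (List Char)),
    l.length ≤ fuel →
    (PySem.Chars.splitOn.go ['\n'] fuel l cur acc).flatten
      = acc.reverse.flatten ++ cur.reverse ++ l.filter (fun c => c != '\n') := by
  induction fuel with
  | zero =>
    intro l cur acc h
    have : l = [] := List.eq_nil_of_length_eq_zero (Nat.le_zero.mp h)
    subst this
    simp [PySem.Chars.splitOn.go]
  | succ n ih =>
    intro l cur acc h
    match l with
    | [] => simp [PySem.Chars.splitOn.go]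
    | c :: rest =>
      rw [PySem.Chars.splitOn.go]
      by_cases hc : c = '\n'
      · subst hc
        simp only [List.isPrefixOf, BEq.rfl, Bool.and_self, if_pos]
        show (PySem.Chars.splitOn.go ['\n'] n rest [] (cur.reverse :: acc)).flatten = _
        rw [ih rest [] (cur.reverse :: acc) (Nat.le_of_succ_le_succ h)]
        simp
      · have hpre : (['\n'].isPrefixOf (c :: rest)) = false := by
          simp [List.isPrefixOf]; exact fun h' => absurd h'.symm hc
        rw [if_neg (by simp [hpre])]
        rw [ih rest (c :: cur) acc (Nat.le_of_succ_le_succ h)]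
        simp [hc]

theorem pv_split_flatten (s : List Char) :
    (PySem.Chars.splitOn s ['\n']).flatten = s.filter (fun c => c != '\n') := by
  rw [PySem.Chars.splitOn, pv_go_flatten (s.length + 1) s [] [] (Nat.le_succ _)]
  simp

theorem pvChar_toNat_lt (c : Char) : c.toNat < 4294967296 := by
  have h := c.val.toNat_lt_size
  unfold UInt32.size at h
  exact h

-- the Python sort key (c.isdigit(), c) as one injective Nat-valued key
def pvKey (c : Char) : Nat := (cond (PySem.Chars.isdigit c) 4294967296 0) + c.toNat

theorem pvKey_inj : Function.Injective pvKey := by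
  intro a b h
  unfold pvKey at h
  have ha := pvChar_toNat_lt a
  have hb := pvChar_toNat_lt b
  have : a.toNat = b.toNat := by
    cases hda : PySem.Chars.isdigit a <;> cases hdb : PySem.Chars.isdigit b <;>
      simp [hda, hdb] at h <;> omega
  exact Char.ext (UInt32.toNat_inj.mp this)

theorem pvChar_lt_iff (a b : Char) : a < b ↔ a.toNat < b.toNat := by
  rw [Char.lt_def]; exact UInt32.lt_iff_toNat_lt

theorem pv_before_eq :
    (fun (a b : Char) => decide (PySem.Chars.isdigit a < PySem.Chars.isdigit b) ||
       !decide (PySem.Chars.isdigit b < PySem.Chars.isdigit a) && decide (a < b))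
    = (fun a b => decide (pvKey a < pvKey b)) := by
  funext a b
  have ha := pvChar_toNat_lt a
  have hb := pvChar_toNat_lt b
  cases hda : PySem.Chars.isdigit a <;> cases hdb : PySem.Chars.isdigit b <;>
    simp [pvKey, hda, hdb, pvChar_lt_iff, Bool.lt_iff] <;> omega

theorem pv_sorted2_eq (xs : List Char) :
    PySem.List.sorted2 xs (fun x => PySem.Chars.isdigit x) (fun x => x) false
      = PySem.List.sorted xs pvKey false := by
  rw [PySem.List.sorted_eq_foldl_insertBy]
  simp only [PySem.List.sorted2]
  norm_num
  rw [pv_before_eq]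

theorem pv_sorted2_perm_eq {xs ys : List Char} (h : xs.Perm ys) :
    PySem.List.sorted2 xs (fun x => PySem.Chars.isdigit x) (fun x => x) false
      = PySem.List.sorted2 ys (fun x => PySem.Chars.isdigit x) (fun x => x) false := by
  rw [pv_sorted2_eq, pv_sorted2_eq]
  exact PySem.List.sorted_eq_sorted_of_perm xs ys pvKey pvKey_inj h

-- the first minimum under the identity key is the unique least element
theorem pv_min_unique {xs ys : List Int} {a b : Int}
    (ha : PySem.List.min? xs (fun v => v) = some a)
    (hb : PySem.List.min? ys (fun v => v) = some b)
    (hm : ∀ x, x ∈ xs ↔ x ∈ ys) : a = b := by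
  have hma := PySem.List.min?_mem ha
  have hmb := PySem.List.min?_mem hb
  have h1 := PySem.List.min?_isMin ha b ((hm b).mpr hmb)
  have h2 := PySem.List.min?_isMin hb a ((hm a).mp hma)
  omega

-- what A's grouping dict holds at any count value: the chars of the sorted items with that count
theorem pv_cnt_getD (S : List (Char × Int)) (m : Int) :
    (S.foldl (fun (d : PySem.Dict Int (List Char)) xy => d.modify xy.2 [] (fun l => l ++ [xy.1]))
        PySem.Dict.empty).getD m []
      = (S.filter (fun p => p.2 == m)).map (fun p => p.1) := by
  have hswap : S.foldl (fun (d : PySem.Dict Int (List Char)) xy => d.modify xy.2 [] (fun l => l ++ [xy.1]))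
        PySem.Dict.empty
      = (S.map Prod.swap).foldl (fun (d : PySem.Dict Int (List Char)) p => d.modify p.1 [] (fun l => l ++ [p.2]))
        PySem.Dict.empty := by
    rw [List.foldl_map]; rfl
  rw [hswap, PySem.Dict.getD_foldl_modify_append, PySem.Dict.getD_empty]
  simp [List.filter_map, Function.comp_def]

-- the keys of A's grouping dict are exactly the counts occurring in S
theorem pv_cnt_keys (S : List (Char × Int)) :
    (S.foldl (fun (d : PySem.Dict Int (List Char)) xy => d.modify xy.2 [] (fun l => l ++ [xy.1]))
        PySem.Dict.empty).keys
      = PySem.Set.ofList (S.map (fun p => p.2)) := by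
  rw [PySem.Dict.keys_foldl_modify_key S (fun p => p.2) [] (fun _ xy => fun l => l ++ [xy.1])]
  rfl

-- ===== VERDICT (by name: the statement is the Claim_ definition above) =====
theorem find_characters_spec : Claim_equal_find_characters := by
  intro matrix _ hpre
  unfold Pre_find_characters at hpre
  unfold Spec_find_characters find_characters find_characters_alt
  simp only [PySem.List.foldl_append_eq_flatten, List.nil_append, pv_split_flatten]
  set xs := matrix.toList.filter (fun c => c != '\n') with hxs
  set items := (PySem.Dict.counter xs).items with hitems
  set S := PySem.List.sorted items (fun x => x.2) false with hS
  set cnt := S.foldl (fun (d : PySem.Dict Int (List Char)) xy => d.modify xy.2 [] (fun l => l ++ [xy.1]))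
      PySem.Dict.empty with hcnt
  -- nonemptiness
  have hxs_ne : xs ≠ [] := by
    obtain ⟨c, hc, hcne⟩ := List.any_eq_true.mp hpre
    intro h
    have : c ∈ xs := List.mem_filter.mpr ⟨hc, hcne⟩
    rw [h] at this; exact absurd this (List.not_mem_nil)
  have hitems_ne : items ≠ [] := by
    obtain ⟨c, hc⟩ := List.exists_mem_of_ne_nil xs hxs_ne
    have hmem : c ∈ PySem.Set.ofList xs := (PySem.Set.mem_ofList xs c).mpr hc
    rw [hitems, PySem.Dict.items_counter]
    exact List.ne_nil_of_mem (List.mem_map_of_mem hmem (f := fun k => (k, (xs.count k : Int))))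
  have hS_ne : S ≠ [] := by
    rw [hS]; intro h
    exact hitems_ne ((PySem.List.sorted_eq_nil_iff items (fun x => x.2) false).mp h)
  -- the two minima coincide
  have hmemkv : ∀ x : Int, x ∈ cnt.keys ↔ x ∈ (PySem.Dict.counter xs).values := by
    intro x
    rw [hcnt, pv_cnt_keys, PySem.Set.mem_ofList]
    unfold PySem.Dict.values
    exact (PySem.List.sorted_perm items (fun x => x.2) false).map (fun p => p.2) |>.mem_iff
  cases hA : PySem.List.min? cnt.keys (fun k => k) with
  | none =>
    exfalso
    have hknil := (PySem.List.min?_eq_none_iff cnt.keys (fun k => k)).mp hA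
    rw [hcnt, pv_cnt_keys] at hknil
    have : S.map (fun p => p.2) = [] := by
      by_contra h
      obtain ⟨v, hv⟩ := List.exists_mem_of_ne_nil _ h
      have := (PySem.Set.mem_ofList _ v).mpr hv
      rw [hknil] at this; exact absurd this (List.not_mem_nil)
    exact hS_ne (List.map_eq_nil_iff.mp this)
  | some mA =>
    cases hB : PySem.List.min? (PySem.Dict.counter xs).values (fun v => v) with
    | none =>
      exfalso
      have hvnil := (PySem.List.min?_eq_none_iff _ (fun v : Int => v)).mp hB
      unfold PySem.Dict.values at hvnil
      exact hitems_ne (List.map_eq_nil_iff.mp hvnil)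
    | some mB =>
      have hm : mA = mB := pv_min_unique hA hB hmemkv
      subst hm
      simp only [hcnt, pv_cnt_getD]
      refine congrArg String.ofList (pv_sorted2_perm_eq ?_)
      exact ((PySem.List.sorted_perm items (fun x => x.2) false).filter (fun p => p.2 == mA)).map
        (fun p => p.1)
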